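-- pv_equiv track=rewrite | github.com/iashevyakov/algos-sql-training | algos-ya-training-8/dynamic/tower.py | get_max_fortress_safety
-- ===== SOURCE A (Python) =====
-- def get_tower_safety(a: list[int], begin: int, end: int) -> int:
--     tower_heights = a[begin:end]
--     tower_heights_sum = sum(tower_heights)
--     tower_heights_min = min(tower_heights)
--     tower_safety = tower_heights_sum * tower_heights_min
--     return tower_safety
--
-- def get_max_fortress_safety(n: int, k: int, a: list[int]) -> tuple[int, list[int]]:
--     prev = [-1] * (n + 1)
--     dp = [0] * (n + 1)
--     for i in range(k, n + 1):
--         for j in range(i - k + 1):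
--             tower_begin = j
--             tower_end = j + k
--             tower_safety = get_tower_safety(a, tower_begin, tower_end)
--
--             cur_tower_safety = dp[tower_begin] + tower_safety
--             if cur_tower_safety > dp[i]:
--                 dp[i] = cur_tower_safety
--                 prev[i] = tower_begin
--
--     ans = []
--     i = n
--     while i > 0 and prev[i] != -1:
--         ans.append(prev[i] + 1)
--         i = prev[i]
--
--     ans.reverse()
--     return len(ans), ans
-- ===== SOURCE B (Python) =====
-- def get_max_fortress_safety(n: int, k: int, a: list[int]) -> tuple[int, list[int]]:
--     if n < k:
--         return 0, []
--     dp = [0] * k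
--     prev = [-1] * k
--     best_v, best_j = 0, -1
--     for t in range(n - k + 1):
--         w = a[t:t + k]
--         c = dp[t] + sum(w) * min(w)
--         if c > best_v:
--             best_v, best_j = c, t
--         dp.append(best_v)
--         prev.append(best_j)
--     ans = []
--     i = n
--     while i > 0 and prev[i] != -1:
--         ans.append(prev[i] + 1)
--         i = prev[i]
--     ans.reverse()
--     return len(ans), ans
-- ===== Notes on version B (the rewrite author's own statement) =====
-- stated objective: faster
-- what changed: A recomputes, for every i, the best split by rescanning all window starts j (dp[i] = max over j of dp[j]+safety(j)); B computes each window's safety once and maintains a single running (best value, first argmax) pair across one left-to-right pass, eliminating the inner scan: O(n*k) instead of O(n^2*k). Intended as faster; a timing run measured B 1.56x at the largest size both versions finished (B keeps A's O(k) per-window sum/min, so both still slow down when k grows with n).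
import Mathlib
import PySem

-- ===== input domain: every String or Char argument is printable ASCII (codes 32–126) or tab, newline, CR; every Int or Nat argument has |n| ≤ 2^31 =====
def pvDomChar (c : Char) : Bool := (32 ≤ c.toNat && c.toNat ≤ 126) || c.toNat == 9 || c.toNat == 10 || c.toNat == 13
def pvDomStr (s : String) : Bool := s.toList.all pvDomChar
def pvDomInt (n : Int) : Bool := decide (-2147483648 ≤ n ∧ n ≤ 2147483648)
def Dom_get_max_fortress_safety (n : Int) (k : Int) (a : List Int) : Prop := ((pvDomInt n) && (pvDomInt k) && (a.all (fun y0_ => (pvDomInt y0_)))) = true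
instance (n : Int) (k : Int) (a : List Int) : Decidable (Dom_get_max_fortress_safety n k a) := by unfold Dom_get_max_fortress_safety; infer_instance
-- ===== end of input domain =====

-- B replaces A's per-i rescan of all window starts by one pass with a running (best, argmax)
-- accumulator, computing each window's safety once (O(n*k) vs A's O(n^2*k); intended as faster,
-- a timing run measured 1.56x at the largest size both finished).
-- ===== PORT A =====
-- helper get_tower_safety: sum(a[begin:end]) * min(a[begin:end])
def get_tower_safety (a : List Int) (bg : Int) (en : Int) : Int :=
  let tower_heights := PySem.List.slice a (some bg) (some en)
  let tower_heights_sum := tower_heights.sum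
  -- min([]) raises ValueError (min? = none); such inputs are excluded by Pre_
  let tower_heights_min := (PySem.List.min? tower_heights (fun x => x)).getD 0
  tower_heights_sum * tower_heights_min

-- the reconstruction loop 'while i > 0 and prev[i] != -1: ans.append(prev[i]+1); i = prev[i]',
-- then 'ans.reverse()'; it appears verbatim in both Pythons, so both ports share it.
-- fuel: under Pre_ each step strictly decreases i (prev[i] ≤ i-k < i), so (n+1).toNat steps suffice.
def pvWalk (prev : List Int) : Nat → Int → List Int → List Int
  | 0, _, ans => ans.reverse
  | fuel+1, i, ans =>
    if i > 0 ∧ PySem.List.pyGetD prev i (-1) ≠ -1 then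
      pvWalk prev fuel (PySem.List.pyGetD prev i (-1)) (ans ++ [PySem.List.pyGetD prev i (-1) + 1])
    else ans.reverse

-- inner loop body of A: reads dp[j], dp[i]; possibly writes dp[i], prev[i]
def pvInnerA (a : List Int) (k : Int) (i : Int) (st : List Int × List Int) (j : Int) :
    List Int × List Int :=
  let tower_begin := j
  let tower_end := j + k
  let tower_safety := get_tower_safety a tower_begin tower_end
  let cur := PySem.List.pyGetD st.1 tower_begin 0 + tower_safety
  if cur > PySem.List.pyGetD st.1 i 0 then
    (PySem.List.pySetD st.1 i cur, PySem.List.pySetD st.2 i tower_begin)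
  else st

def get_max_fortress_safety (n : Int) (k : Int) (a : List Int) : Int × List Int :=
  let prev := List.replicate (n + 1).toNat (-1 : Int)
  let dp := List.replicate (n + 1).toNat (0 : Int)
  let st := (PySem.List.pyRange k (n + 1) 1).foldl
    (fun st i => (PySem.List.pyRange 0 (i - k + 1) 1).foldl (pvInnerA a k i) st) (dp, prev)
  let ans := pvWalk st.2 (n + 1).toNat n []
  ((ans.length : Int), ans)

-- ===== PORT B =====
-- loop body of B: state (dp, prev, best_v, best_j); one window, one running-best update, two appends
def pvStepB (a : List Int) (k : Int) (st : List Int × List Int × Int × Int) (t : Int) :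
    List Int × List Int × Int × Int :=
  let w := PySem.List.slice a (some t) (some (t + k))
  -- min([]) raises ValueError in Python; excluded by Pre_
  let c := PySem.List.pyGetD st.1 t 0 + w.sum * (PySem.List.min? w (fun x => x)).getD 0
  let best := if c > st.2.2.1 then (c, t) else (st.2.2.1, st.2.2.2)
  (st.1 ++ [best.1], st.2.1 ++ [best.2], best.1, best.2)

def get_max_fortress_safety_alt (n : Int) (k : Int) (a : List Int) : Int × List Int :=
  if n < k then (0, [])
  else
    let st := (PySem.List.pyRange 0 (n - k + 1) 1).foldl (pvStepB a k)
      (List.replicate k.toNat (0 : Int), List.replicate k.toNat (-1 : Int), 0, -1)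
    let ans := pvWalk st.2.1 (n + 1).toNat n []
    ((ans.length : Int), ans)

-- ===== PRECONDITION & SPEC =====
-- Pre_ is exactly the set of inputs on which the Python A returns: outside it A raises
-- (ValueError from min() on an empty window when k ≤ n fails 1 ≤ k or n - k < len(a),
--  or IndexError on dp when n < 0 with windows wrapping negatively).
def Pre_get_max_fortress_safety (n : Int) (k : Int) (a : List Int) : Prop :=
  n < k ∨ (1 ≤ k ∧ n - k < (a.length : Int))
instance (n : Int) (k : Int) (a : List Int) : Decidable (Pre_get_max_fortress_safety n k a) := by
  unfold Pre_get_max_fortress_safety; infer_instance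

def pvWitness_get_max_fortress_safety : Int × Int × List Int := (3, 2, [5, 1, 4])

def Spec_get_max_fortress_safety (n : Int) (k : Int) (a : List Int) (out : Int × List Int) : Prop := out = get_max_fortress_safety_alt n k a
instance (n : Int) (k : Int) (a : List Int) (out : Int × List Int) : Decidable (Spec_get_max_fortress_safety n k a out) := by unfold Spec_get_max_fortress_safety; infer_instance

-- ===== CLAIM (what is proved, stated in full; the proofs are below) =====
def Claim_equal_get_max_fortress_safety : Prop := ∀ (n : Int) (k : Int) (a : List Int), Dom_get_max_fortress_safety n k a → Pre_get_max_fortress_safety n k a → Spec_get_max_fortress_safety n k a (get_max_fortress_safety n k a)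

-- ===== LEMMAS AND PROOFS =====

-- pure running-best step: what one j contributes to (best value, first argmax), reading dp
def pvBest (a : List Int) (k : Int) (dp : List Int) (vb : Int × Int) (j : Int) : Int × Int :=
  let c := PySem.List.pyGetD dp j 0 + get_tower_safety a j (j + k)
  if c > vb.1 then (c, j) else vb

-- A's outer loop after c iterations (i = k .. k+c-1)
def pvAState (a : List Int) (n k : Int) (c : Nat) : List Int × List Int :=
  (PySem.List.pyRange k (k + (c : Int)) 1).foldl
    (fun st i => (PySem.List.pyRange 0 (i - k + 1) 1).foldl (pvInnerA a k i) st)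
    (List.replicate (n + 1).toNat 0, List.replicate (n + 1).toNat (-1))

-- B's loop after c iterations (t = 0 .. c-1)
def pvBState (a : List Int) (k : Int) (c : Nat) : List Int × List Int × Int × Int :=
  (PySem.List.pyRange 0 (c : Int) 1).foldl (pvStepB a k)
    (List.replicate k.toNat (0 : Int), List.replicate k.toNat (-1 : Int), 0, -1)

lemma pvGetD_append (xs ys : List Int) (j d : Int) (h0 : 0 ≤ j) (h1 : j < (xs.length : Int)) :
    PySem.List.pyGetD (xs ++ ys) j d = PySem.List.pyGetD xs j d := by
  have hl : j < ((xs ++ ys).length : Int) := by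
    rw [List.length_append]; push_cast; omega
  rw [PySem.List.pyGetD_eq_getElem _ d h0 hl, PySem.List.pyGetD_eq_getElem _ d h0 h1]
  exact List.getElem_append_left (by omega)

lemma pvGetD_append_rep (xs : List Int) (m : Nat) (v d : Int) (hm : 0 < m) :
    PySem.List.pyGetD (xs ++ List.replicate m v) (xs.length : Int) d = v := by
  have hl : (xs.length : Int) < ((xs ++ List.replicate m v).length : Int) := by
    rw [List.length_append, List.length_replicate]; push_cast; omega
  rw [PySem.List.pyGetD_eq_getElem _ d (by positivity) hl]
  have : (xs.length : Int).toNat = xs.length := by omega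
  rw [List.getElem_append_right (by omega)]
  simp [this]

lemma pvGetD_setD_ne (dp : List Int) (i j c d : Int) (hi : 0 ≤ i) (hj0 : 0 ≤ j) (hji : j < i)
    (hdp : i < (dp.length : Int)) :
    PySem.List.pyGetD (PySem.List.pySetD dp i c) j d = PySem.List.pyGetD dp j d := by
  have hj : j < (dp.length : Int) := lt_trans hji hdp
  rw [PySem.List.pySetD_of_nonneg _ _ hi,
      PySem.List.pyGetD_eq_getElem _ d hj0 (by simpa using hj),
      PySem.List.pyGetD_eq_getElem _ d hj0 hj]
  exact List.getElem_set_ne (by omega) _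

lemma pvGetD_replicate (m : Nat) (i v : Int) :
    PySem.List.pyGetD (List.replicate m v) i v = v := by
  by_cases h : PySem.Raise.InRange (List.replicate m v).length i
  · exact List.eq_of_mem_replicate (PySem.List.pyGetD_mem _ v h)
  · exact PySem.List.pyGetD_of_none _ _ _ ((PySem.List.pyGet?_eq_none_iff _ _).mpr h)

lemma pvWalk_stop (prev : List Int) (f : Nat) (i : Int)
    (h : PySem.List.pyGetD prev i (-1) = -1) (ans : List Int) :
    pvWalk prev f i ans = ans.reverse := by
  cases f with
  | zero => rfl
  | succ f => unfold pvWalk; rw [if_neg]; simp [h]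

lemma pvInner_spec (a : List Int) (k i : Int) (hi : 0 ≤ i) :
    ∀ (js : List Int) (dp prev : List Int),
      i < (dp.length : Int) → i < (prev.length : Int) →
      (∀ j ∈ js, 0 ≤ j ∧ j < i) →
      js.foldl (pvInnerA a k i) (dp, prev)
        = (PySem.List.pySetD dp i
             ((js.foldl (pvBest a k dp)
                (PySem.List.pyGetD dp i 0, PySem.List.pyGetD prev i (-1))).1),
           PySem.List.pySetD prev i
             ((js.foldl (pvBest a k dp)
                (PySem.List.pyGetD dp i 0, PySem.List.pyGetD prev i (-1))).2)) := by
  intro js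
  induction js with
  | nil =>
    intro dp prev hdp hprev _
    have hdp' : i.toNat < dp.length := by omega
    have hprev' : i.toNat < prev.length := by omega
    simp only [List.foldl_nil]
    rw [PySem.List.pySetD_of_nonneg _ _ hi, PySem.List.pySetD_of_nonneg _ _ hi,
        PySem.List.pyGetD_eq_getElem _ _ hi hdp, PySem.List.pyGetD_eq_getElem _ _ hi hprev,
        List.set_getElem_self hdp', List.set_getElem_self hprev']
  | cons j js ih =>
    intro dp prev hdp hprev hjs
    obtain ⟨hj0, hji⟩ := hjs j List.mem_cons_self
    have hjdp : j < (dp.length : Int) := lt_trans hji hdp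
    have hjs' : ∀ x ∈ js, 0 ≤ x ∧ x < i := fun x hx => hjs x (List.mem_cons_of_mem _ hx)
    simp only [List.foldl_cons]
    by_cases hc :
        PySem.List.pyGetD dp j 0 + get_tower_safety a j (j + k) > PySem.List.pyGetD dp i 0
    · have hbody : pvInnerA a k i (dp, prev) j
          = (PySem.List.pySetD dp i (PySem.List.pyGetD dp j 0 + get_tower_safety a j (j + k)),
             PySem.List.pySetD prev i j) := by
        simp only [pvInnerA, if_pos hc]
      rw [hbody]
      set c := PySem.List.pyGetD dp j 0 + get_tower_safety a j (j + k) with hcdef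
      have hlen1 : i < ((PySem.List.pySetD dp i c).length : Int) := by
        rw [PySem.List.pySetD_of_nonneg _ _ hi, List.length_set]; exact hdp
      have hlen2 : i < ((PySem.List.pySetD prev i j).length : Int) := by
        rw [PySem.List.pySetD_of_nonneg _ _ hi, List.length_set]; exact hprev
      rw [ih (PySem.List.pySetD dp i c) (PySem.List.pySetD prev i j) hlen1 hlen2 hjs']
      have hget1 : PySem.List.pyGetD (PySem.List.pySetD dp i c) i 0 = c := by
        rw [PySem.List.pySetD_of_nonneg _ _ hi,
            PySem.List.pyGetD_eq_getElem _ _ hi (by simpa using hdp)]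
        simp
      have hget2 : PySem.List.pyGetD (PySem.List.pySetD prev i j) i (-1) = j := by
        rw [PySem.List.pySetD_of_nonneg _ _ hi,
            PySem.List.pyGetD_eq_getElem _ _ hi (by simpa using hprev)]
        simp
      have hcongr : js.foldl (pvBest a k (PySem.List.pySetD dp i c)) (c, j)
          = js.foldl (pvBest a k dp) (c, j) := by
        apply PySem.List.foldl_congr_mem
        intro acc x hx
        obtain ⟨hx0, hxi⟩ := hjs' x hx
        simp only [pvBest, pvGetD_setD_ne dp i x c 0 hi hx0 hxi hdp]
      have hstep : pvBest a k dp (PySem.List.pyGetD dp i 0, PySem.List.pyGetD prev i (-1)) j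
          = (c, j) := by
        simp only [pvBest, ← hcdef, if_pos hc]
      rw [hget1, hget2, hcongr, hstep]
      simp only [PySem.List.pySetD_of_nonneg _ _ hi, List.set_set]
    · have hbody : pvInnerA a k i (dp, prev) j = (dp, prev) := by
        simp only [pvInnerA, if_neg hc]
      have hstep : pvBest a k dp (PySem.List.pyGetD dp i 0, PySem.List.pyGetD prev i (-1)) j
          = (PySem.List.pyGetD dp i 0, PySem.List.pyGetD prev i (-1)) := by
        simp only [pvBest, if_neg hc]
      rw [hbody, ih dp prev hdp hprev hjs', hstep]

lemma pvLoop_inv (a : List Int) (n k : Int) (h1 : 1 ≤ k) (h2 : k ≤ n) :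
    ∀ (c : Nat), (c : Int) ≤ n - k + 1 →
      (pvBState a k c).1.length = k.toNat + c ∧
      (pvBState a k c).2.1.length = k.toNat + c ∧
      pvAState a n k c
        = ((pvBState a k c).1 ++ List.replicate ((n + 1).toNat - (k.toNat + c)) 0,
           (pvBState a k c).2.1 ++ List.replicate ((n + 1).toNat - (k.toNat + c)) (-1)) ∧
      ((pvBState a k c).2.2.1, (pvBState a k c).2.2.2)
        = (PySem.List.pyRange 0 (c : Int) 1).foldl (pvBest a k (pvBState a k c).1) (0, -1) := by
  intro c
  induction c with
  | zero =>
    intro _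
    have hB : pvBState a k 0
        = (List.replicate k.toNat 0, List.replicate k.toNat (-1), 0, -1) := by
      simp [pvBState, PySem.List.pyRange_one_eq_nil (by omega : (0:Int) ≤ 0)]
    have hA : pvAState a n k 0
        = (List.replicate (n+1).toNat 0, List.replicate (n+1).toNat (-1)) := by
      simp [pvAState]
    rw [hB, hA]
    refine ⟨by simp, by simp, ?_, by simp⟩
    have e1 : List.replicate (n+1).toNat (0:Int)
        = List.replicate k.toNat 0 ++ List.replicate ((n+1).toNat - (k.toNat + 0)) 0 := by
      rw [← List.replicate_add]; congr 1; omega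
    have e2 : List.replicate (n+1).toNat (-1:Int)
        = List.replicate k.toNat (-1) ++ List.replicate ((n+1).toNat - (k.toNat + 0)) (-1) := by
      rw [← List.replicate_add]; congr 1; omega
    exact Prod.ext e1 e2
  | succ c ih =>
    intro hc1
    have hc : (c:Int) ≤ n - k + 1 := by push_cast at hc1 ⊢; omega
    have hkc : k + (c:Int) ≤ n := by push_cast at hc1; omega
    obtain ⟨hl1, hl2, hA, hVB⟩ := ih hc
    set Bc := pvBState a k c with hBcdef
    set K := k.toNat with hK
    set M := (n+1).toNat - (K + c) with hMdef
    have hM1 : 1 ≤ M := by omega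
    -- B makes one step
    have hrB : PySem.List.pyRange 0 ((c+1 : Nat) : Int) 1
        = PySem.List.pyRange 0 (c:Int) 1 ++ [(c:Int)] := by
      push_cast; exact PySem.List.pyRange_one_succ_right (by positivity)
    have hBsucc : pvBState a k (c+1) = pvStepB a k Bc (c:Int) := by
      simp only [pvBState, hrB, List.foldl_append, List.foldl_cons, List.foldl_nil, hBcdef]
    set best := pvBest a k Bc.1 (Bc.2.2.1, Bc.2.2.2) (c:Int) with hbest
    have hstepB : pvStepB a k Bc (c:Int)
        = (Bc.1 ++ [best.1], Bc.2.1 ++ [best.2], best.1, best.2) := by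
      simp only [pvStepB, hbest, pvBest, get_tower_safety]
    have hVB' : best = (PySem.List.pyRange 0 ((c+1:Nat):Int) 1).foldl (pvBest a k Bc.1) (0, -1) := by
      rw [hrB, List.foldl_append, List.foldl_cons, List.foldl_nil, ← hVB]
    -- A makes one step
    have hrA : PySem.List.pyRange k (k + ((c+1:Nat):Int)) 1
        = PySem.List.pyRange k (k + (c:Int)) 1 ++ [k + (c:Int)] := by
      have : k + ((c+1:Nat):Int) = (k + (c:Int)) + 1 := by push_cast; ring
      rw [this]; exact PySem.List.pyRange_one_succ_right (by omega)
    have hAsucc : pvAState a n k (c+1)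
        = (PySem.List.pyRange 0 ((k + (c:Int)) - k + 1) 1).foldl
            (pvInnerA a k (k + (c:Int))) (pvAState a n k c) := by
      simp only [pvAState, hrA, List.foldl_append, List.foldl_cons, List.foldl_nil]
    have hidx : (k + (c:Int)) - k + 1 = ((c+1:Nat):Int) := by push_cast; ring
    set i := k + (c:Int) with hidef
    set dpA := Bc.1 ++ List.replicate M (0:Int) with hdpA
    set prevA := Bc.2.1 ++ List.replicate M (-1:Int) with hprevA
    have hlenA : dpA.length = (n+1).toNat := by
      rw [hdpA, List.length_append, List.length_replicate, hl1]; omega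
    have hlenP : prevA.length = (n+1).toNat := by
      rw [hprevA, List.length_append, List.length_replicate, hl2]; omega
    have hi0 : 0 ≤ i := by omega
    have hiA : i < (dpA.length : Int) := by rw [hlenA]; omega
    have hiP : i < (prevA.length : Int) := by rw [hlenP]; omega
    have hmem : ∀ j ∈ PySem.List.pyRange 0 ((c+1:Nat):Int) 1, 0 ≤ j ∧ j < i := by
      intro j hj
      rw [PySem.List.mem_pyRange_one] at hj
      constructor
      · exact hj.1
      · have := hj.2; push_cast at this; omega
    have hinner := pvInner_spec a k i hi0 (PySem.List.pyRange 0 ((c+1:Nat):Int) 1) dpA prevA hiA hiP hmem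
    -- the start pair of the pure fold is (0, -1)
    have hiBc : i = ((Bc.1).length : Int) := by rw [hl1]; push_cast; omega
    have hiBc2 : i = ((Bc.2.1).length : Int) := by rw [hl2]; push_cast; omega
    have hget0 : PySem.List.pyGetD dpA i 0 = 0 := by
      rw [hdpA, hiBc]; exact pvGetD_append_rep _ M _ _ hM1
    have hgetm1 : PySem.List.pyGetD prevA i (-1) = -1 := by
      rw [hprevA, hiBc2]; exact pvGetD_append_rep _ M _ _ hM1
    -- lookups of the pure fold see only Bc.1
    have hcongr : (PySem.List.pyRange 0 ((c+1:Nat):Int) 1).foldl (pvBest a k dpA) (0, -1)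
        = (PySem.List.pyRange 0 ((c+1:Nat):Int) 1).foldl (pvBest a k Bc.1) (0, -1) := by
      apply PySem.List.foldl_congr_mem
      intro acc x hx
      rw [PySem.List.mem_pyRange_one] at hx
      have hx1 : x < ((Bc.1).length : Int) := by
        rw [hl1]; have := hx.2; push_cast at this ⊢; omega
      simp only [pvBest, hdpA, pvGetD_append _ _ x 0 hx.1 hx1]
    -- writing at index i extends Bc by one cell
    have hMsucc : M = (M - 1) + 1 := by omega
    have hsetdp : ∀ v : Int, PySem.List.pySetD dpA i v = (Bc.1 ++ [v]) ++ List.replicate (M-1) 0 := by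
      intro v
      rw [hdpA, PySem.List.pySetD_of_nonneg _ _ hi0, hMsucc, List.replicate_succ]
      have : i.toNat = (Bc.1).length := by rw [hl1]; omega
      rw [this]; simp
    have hsetprev : ∀ v : Int, PySem.List.pySetD prevA i v = (Bc.2.1 ++ [v]) ++ List.replicate (M-1) (-1) := by
      intro v
      rw [hprevA, PySem.List.pySetD_of_nonneg _ _ hi0, hMsucc, List.replicate_succ]
      have : i.toNat = (Bc.2.1).length := by rw [hl2]; omega
      rw [this]; simp
    have hrep : (n+1).toNat - (K + (c+1)) = M - 1 := by omega
    refine ⟨?_, ?_, ?_, ?_⟩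
    · rw [hBsucc, hstepB]; simp [hl1]; omega
    · rw [hBsucc, hstepB]; simp [hl2]; omega
    · rw [hAsucc, hA, hidx, hinner, hget0, hgetm1, hcongr, ← hVB',
          hBsucc, hstepB, hrep, hsetdp, hsetprev]
    · rw [hBsucc, hstepB]
      simp only []
      rw [hVB']
      apply PySem.List.foldl_congr_mem
      intro acc x hx
      rw [PySem.List.mem_pyRange_one] at hx
      have hx1 : x < ((Bc.1).length : Int) := by
        rw [hl1]; have := hx.2; push_cast at this ⊢; omega
      simp only [pvBest, pvGetD_append _ _ x 0 hx.1 hx1]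

theorem get_max_fortress_safety_spec : Claim_equal_get_max_fortress_safety := by
  intro n k a _ hpre
  unfold Spec_get_max_fortress_safety
  by_cases hnk : n < k
  · -- k > n: A's outer loop is empty and prev stays all -1, so the walk stops at once
    simp only [get_max_fortress_safety, get_max_fortress_safety_alt, if_pos hnk,
      PySem.List.pyRange_one_eq_nil (by omega : n + 1 ≤ k), List.foldl_nil]
    rw [pvWalk_stop _ _ _ (pvGetD_replicate _ _ _)]
    simp
  · obtain ⟨h1, _⟩ := hpre.resolve_left hnk
    have h2 : k ≤ n := by omega
    set C := (n - k + 1).toNat with hCdef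
    obtain ⟨hl1, hl2, hA, _⟩ := pvLoop_inv a n k h1 h2 C (by omega)
    have hM0 : (n + 1).toNat - (k.toNat + C) = 0 := by omega
    unfold pvAState at hA
    rw [show k + ((C : Nat) : Int) = n + 1 from by omega, hM0] at hA
    simp only [List.replicate_zero, List.append_nil] at hA
    simp only [get_max_fortress_safety, get_max_fortress_safety_alt, if_neg hnk]
    rw [show (n - k + 1 : Int) = ((C : Nat) : Int) from by omega]
    have hBfold : (PySem.List.pyRange 0 ((C : Nat) : Int) 1).foldl (pvStepB a k)
        (List.replicate k.toNat (0 : Int), List.replicate k.toNat (-1 : Int), 0, -1)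
        = pvBState a k C := rfl
    rw [hBfold, hA]
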